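-- pv_equiv track=rewrite | github.com/JSRivero/oracle-multiples | utilities_multiples.py | get_remainders_power_2
-- ===== SOURCE A (Python) =====
-- def get_remainders_power_2(number, power):
--     '''
--     Remainders of powers of 2
--     Given a number and a power, returns an array with the remainders of
--     dividing powers of 2 up to the given power by the provided number
--
--     Input:
--         - number (int): Integer number greater than 2
--         - power (int): Integer, compute powers of 2 up to that exponent
--
--     Ouput:
--         - remainders (list): List of remainders of the power of 2.
--
--     This functions conducts no checks on the input.
--     '''
--
--     remainders = [1, 2]
--
--     for p in range(2, power + 1):
--         check_num = remainders[-1]*2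
--         if check_num >= number:
--             check_num = check_num - number
--         else:
--             pass
--         if check_num == 1:
--             complete_repetitions = power // len(remainders) + 1
--             # rondas_parcial = power % len(remainders)
--             # remainders = remainders * rondas_completas + remainders[:rondas_parcial+1]
--             remainders = remainders * complete_repetitions
--             remainders = remainders[:power+1]
--             break
--         else:
--             pass
--
--         remainders.append(check_num)
--
--     return remainders
-- ===== SOURCE B (Python) =====
-- def get_remainders_power_2(number, power):
--     # Stateless re-implementation: each remainder 2^p mod number is computed
--     # independently by modular exponentiation; the [1, 2] seed matches the
--     # documented domain number > 2 (where 2 % number == 2).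
--     return [1, 2] + [pow(2, p, number) for p in range(2, power + 1)]
-- ===== Notes on version B (the rewrite author's own statement) =====
-- stated objective: simpler
-- what changed: Replaces A's stateful double-and-conditionally-subtract loop with cycle detection and list tiling by a one-line comprehension computing each remainder independently as pow(2, p, number).
-- outside the precondition, e.g. on get_remainders_power_2(2, 3): A returns [1, 2, 2, 2], B returns [1, 2, 0, 0]; on get_remainders_power_2(0, 4): A returns [1, 2, 4, 8, 16], B raises ValueError
import Mathlib
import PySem

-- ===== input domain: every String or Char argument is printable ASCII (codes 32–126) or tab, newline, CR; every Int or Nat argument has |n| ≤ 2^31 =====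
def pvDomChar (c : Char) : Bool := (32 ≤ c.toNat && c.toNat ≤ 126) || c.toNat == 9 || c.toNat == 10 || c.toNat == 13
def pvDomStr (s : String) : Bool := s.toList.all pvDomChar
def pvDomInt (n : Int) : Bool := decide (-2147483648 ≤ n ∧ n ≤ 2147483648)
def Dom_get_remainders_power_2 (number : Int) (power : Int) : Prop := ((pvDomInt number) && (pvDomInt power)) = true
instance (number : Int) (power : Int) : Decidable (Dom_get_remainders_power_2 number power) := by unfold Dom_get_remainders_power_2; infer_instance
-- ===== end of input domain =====

-- B computes each remainder independently as pow(2, p, number) instead of A's stateful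
-- doubling loop with cycle detection and tiling; objective: simpler. Pre_ restricts to the
-- function's documented domain number > 2 ("number (int): Integer number greater than 2").


-- ===== PORT A =====
-- the `for p in range(2, power+1)` loop: state is `remainders`; `break` returns the tiled slice
def aLoop (number power : Int) (rem : List Int) : List Int → List Int
  | [] => rem
  | _p :: ps =>
    -- check_num = remainders[-1]*2  (remainders is never empty: it starts as [1, 2] and only grows)
    let check0 := ((PySem.List.pyGet? rem (-1)).getD 0) * 2
    let check_num := if check0 ≥ number then check0 - number else check0
    if check_num = 1 then
      -- remainders = (remainders * (power // len(remainders) + 1))[:power+1]; break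
      PySem.List.slice
        (PySem.List.pyRepeat rem (PySem.Int.floordiv power (rem.length : Int) + 1))
        none (some (power + 1))
    else
      aLoop number power (rem ++ [check_num]) ps

def get_remainders_power_2 (number : Int) (power : Int) : List Int :=
  aLoop number power [1, 2] (PySem.List.pyRange 2 (power + 1) 1)

-- ===== PORT B =====
-- pow(2, p, number): p ranges over range(2, power+1) so p ≥ 2 and p.toNat is exact
def get_remainders_power_2_alt (number : Int) (power : Int) : List Int :=
  [1, 2] ++ (PySem.List.pyRange 2 (power + 1) 1).map
    (fun p => PySem.Int.powMod 2 p.toNat number)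

-- ===== PRECONDITION & SPEC =====
-- Pre_ restricts to the documented natural domain "number (int): Integer number greater than 2"
-- (the docstring adds "This functions conducts no checks on the input"); for number ≤ 2 A's
-- running double-and-subtract no longer computes 2^p mod number (e.g. A (2,3) = [1,2,2,2],
-- B (2,3) = [1,2,0,0]) and for number = 0 B raises ValueError; for power ≤ 1 the loop body
-- never runs and both return [1, 2] whatever number is, so those inputs stay inside Pre_.
def Pre_get_remainders_power_2 (number : Int) (power : Int) : Prop := 3 ≤ number ∨ power ≤ 1
instance (number : Int) (power : Int) : Decidable (Pre_get_remainders_power_2 number power) := by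
  unfold Pre_get_remainders_power_2; infer_instance

def pvWitness_get_remainders_power_2 : Int × Int := (7, 10)

def Spec_get_remainders_power_2 (number : Int) (power : Int) (out : List Int) : Prop :=
  out = get_remainders_power_2_alt number power
instance (number : Int) (power : Int) (out : List Int) :
    Decidable (Spec_get_remainders_power_2 number power out) := by
  unfold Spec_get_remainders_power_2; infer_instance

-- ===== CLAIM (what is proved, stated in full; the proofs are below) =====
def Claim_equal_get_remainders_power_2 : Prop :=
  ∀ (number : Int) (power : Int), Dom_get_remainders_power_2 number power →
    Pre_get_remainders_power_2 number power →
    Spec_get_remainders_power_2 number power (get_remainders_power_2 number power)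

-- ===== LEMMAS AND PROOFS =====

-- the value sequence: pvG n i = 2^i mod n (Int.emod; equals Python's % for n > 0)
def pvG (n : Int) (i : Nat) : Int := (2 ^ i) % n

lemma pvG_nonneg {n : Int} (hn : 0 < n) (i : Nat) : 0 ≤ pvG n i :=
  Int.emod_nonneg _ (by omega)

lemma pvG_lt {n : Int} (hn : 0 < n) (i : Nat) : pvG n i < n :=
  Int.emod_lt_of_pos _ hn

-- one loop step: doubling the previous remainder and conditionally subtracting n IS 2^(k+1) mod n
lemma pvG_step {n : Int} (hn : 3 ≤ n) (k : Nat) :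
    (if pvG n k * 2 ≥ n then pvG n k * 2 - n else pvG n k * 2) = pvG n (k + 1) := by
  have h0 : 0 ≤ pvG n k := pvG_nonneg (by omega) k
  have h1 : pvG n k < n := pvG_lt (by omega) k
  have h2 : (2 : Int) % n = 2 := Int.emod_eq_of_lt (by omega) (by omega)
  have key : pvG n (k + 1) = (pvG n k * 2) % n := by
    unfold pvG
    rw [pow_succ, Int.mul_emod, h2]
  rw [key]
  split_ifs with h
  · rw [← Int.sub_emod_right (pvG n k * 2) n, Int.emod_eq_of_lt (by omega) (by omega)]
  · rw [Int.emod_eq_of_lt (by omega) (by omega)]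

-- periodicity: if 2^k ≡ 1 (mod n) then pvG n is k-periodic
lemma pvG_period {n : Int} {k : Nat} (hk : pvG n k = 1) (i : Nat) :
    pvG n (i + k) = pvG n i := by
  unfold pvG at *
  rw [pow_add, Int.mul_emod, hk, mul_one, Int.emod_emod_of_dvd _ (dvd_refl n)]

lemma pvG_mod {n : Int} {k : Nat} (hkpos : 0 < k) (hk : pvG n k = 1) (j : Nat) :
    pvG n j = pvG n (j % k) := by
  induction j using Nat.strong_induction_on with
  | _ j ih =>
    by_cases h : j < k
    · rw [Nat.mod_eq_of_lt h]
    · calc pvG n j = pvG n ((j - k) + k) := by congr 1; omega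
        _ = pvG n (j - k) := pvG_period hk _
        _ = pvG n ((j - k) % k) := ih (j - k) (by omega)
        _ = pvG n (j % k) := by rw [← Nat.mod_eq_sub_mod (Nat.le_of_not_lt h)]

-- indexing a tiled list
lemma getElem?_flatten_replicate {α : Type} (l : List α) :
    ∀ (r j : Nat), j < r * l.length →
      ((List.replicate r l).flatten)[j]? = l[j % l.length]? := by
  intro r
  induction r with
  | zero => intro j h; omega
  | succ r ih =>
    intro j h
    have hs : (r + 1) * l.length = r * l.length + l.length := by ring
    rw [List.replicate_succ, List.flatten_cons]
    by_cases hj : j < l.length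
    · rw [List.getElem?_append_left hj, Nat.mod_eq_of_lt hj]
    · rw [List.getElem?_append_right (by omega), ih (j - l.length) (by omega)]
      rw [← Nat.mod_eq_sub_mod (Nat.le_of_not_lt hj)]

-- the break branch: tiling the first period and truncating gives the whole map
lemma pvTile {n : Int} {k : Nat} (hk2 : 0 < k) (hk : pvG n k = 1)
    (P : Nat) (r : Nat) (hr : P ≤ r * k) :
    (List.replicate r ((List.range k).map (pvG n))).flatten.take P
      = (List.range P).map (pvG n) := by
  apply List.ext_getElem?
  intro j
  by_cases hj : j < P
  · rw [List.getElem?_take_of_lt hj]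
    have hlen : ((List.range k).map (pvG n)).length = k := by simp
    rw [getElem?_flatten_replicate _ r j (by rw [hlen]; omega), hlen]
    have hjk : j % k < k := Nat.mod_lt _ hk2
    rw [List.getElem?_map, List.getElem?_map, List.getElem?_range hjk, List.getElem?_range hj]
    simp only [Option.map_some]
    rw [← pvG_mod hk2 hk j]
  · rw [List.getElem?_eq_none (by simp; omega), List.getElem?_eq_none (by simp; omega)]

-- the last element of the accumulated remainders list
lemma pvLast {n : Int} {k : Nat} (hk : 1 ≤ k) :
    ((PySem.List.pyGet? ((List.range k).map (pvG n)) (-1)).getD 0) = pvG n (k - 1) := by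
  simp only [PySem.List.pyGet?, PySem.List.pyIdx?]
  simp [hk, List.getElem?_map, List.getElem?_range (by omega : k - 1 < k)]

-- the loop invariant: starting from the first k remainders, the loop produces the full map
lemma aLoop_spec {n : Int} (hn : 3 ≤ n) (power : Int) :
    ∀ (m : Nat) (k : Nat), 2 ≤ k → (k : Int) + m = power + 1 →
      aLoop n power ((List.range k).map (pvG n)) (PySem.List.pyRange (k : Int) (power + 1) 1)
        = (List.range (power + 1).toNat).map (pvG n) := by
  intro m
  induction m with
  | zero =>
    intro k hk2 hkm
    rw [PySem.List.pyRange_one_eq_nil (by omega)]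
    show (List.range k).map (pvG n) = _
    congr 2
    omega
  | succ m ih =>
    intro k hk2 hkm
    rw [PySem.List.pyRange_one_cons (by omega)]
    show aLoop n power ((List.range k).map (pvG n)) (_ :: _) = _
    rw [aLoop]
    simp only [pvLast (by omega : 1 ≤ k), List.length_map, List.length_range]
    have hstep := pvG_step hn (k - 1)
    have hk1 : k - 1 + 1 = k := by omega
    rw [hk1] at hstep
    rw [hstep]
    by_cases hbreak : pvG n k = 1
    · rw [if_pos hbreak]
      have hkpos : (0 : Int) < (k : Int) := by omega
      have hfd : PySem.Int.floordiv power (k : Int) = power / (k : Int) :=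
        PySem.Int.floordiv_eq_ediv_of_pos hkpos
      have hP : power + 1 = (((power + 1).toNat : Nat) : Int) := by omega
      rw [hfd, hP, PySem.List.slice_to_natCast]
      show (List.replicate (power / (k : Int) + 1).toNat ((List.range k).map (pvG n))).flatten.take
          (power + 1).toNat = _
      apply pvTile (by omega) hbreak
      -- (power+1).toNat ≤ (power/k + 1).toNat * k
      have hdm := Int.mul_ediv_add_emod power (k : Int)
      have hm0 : 0 ≤ power % (k : Int) := Int.emod_nonneg _ (by omega)
      have hm1 : power % (k : Int) < (k : Int) := Int.emod_lt_of_pos _ hkpos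
      have hq0 : 0 ≤ power / (k : Int) := Int.ediv_nonneg (by omega) (by omega)
      zify
      push_cast [Int.toNat_of_nonneg (by omega : (0:Int) ≤ power + 1),
        Int.toNat_of_nonneg (by omega : (0:Int) ≤ power / (k : Int) + 1)]
      nlinarith
    · rw [if_neg hbreak]
      have hext : (List.range k).map (pvG n) ++ [pvG n k] = (List.range (k + 1)).map (pvG n) := by
        rw [List.range_succ, List.map_append]
        rfl
      rw [hext]
      have := ih (k + 1) (by omega) (by push_cast; omega)
      rw [(by push_cast; ring : (((k + 1 : Nat) : Nat) : Int) = (k : Int) + 1)] at this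
      exact this

-- ===== VERDICT (by name: the statement is the Claim_ definition above) =====
theorem get_remainders_power_2_spec : Claim_equal_get_remainders_power_2 := by
  intro n power _ hpre
  unfold Spec_get_remainders_power_2 get_remainders_power_2 get_remainders_power_2_alt
  by_cases hp : power ≤ 1
  · rw [PySem.List.pyRange_one_eq_nil (by omega)]
    rfl
  · -- power ≥ 2, so Pre_ gives 3 ≤ n
    have hn : 3 ≤ n := by rcases hpre with h | h; exact h; omega
    have h1n : (1 : Int) % n = 1 := Int.emod_eq_of_lt (by omega) (by omega)
    have h2n : (2 : Int) % n = 2 := Int.emod_eq_of_lt (by omega) (by omega)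
    have hseed : ([1, 2] : List Int) = (List.range 2).map (pvG n) := by
      simp [pvG, List.range_succ, h1n, h2n]
    rw [hseed]
    have hA := aLoop_spec hn power (power - 1).toNat 2 (by omega) (by omega)
    rw [(by norm_num : ((2 : Nat) : Int) = (2 : Int))] at hA
    rw [hA]
    -- B side
    rw [PySem.List.pyRange_one]
    have hM : (power + 1 - 2).toNat = (power - 1).toNat := by omega
    rw [hM]
    have hPsplit : (power + 1).toNat = 2 + (power - 1).toNat := by omega
    rw [hPsplit, List.range_add, List.map_append, List.map_map, List.map_map]
    rw [← hseed]
    congr 1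
    apply List.map_congr_left
    intro j hj
    simp only [Function.comp]
    have htn : ((2 : Int) + (j : Int)).toNat = 2 + j := by omega
    rw [htn]
    unfold PySem.Int.powMod pvG
    rw [PySem.Int.mod_eq_emod_of_pos (by omega)]
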